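-- pv_equiv track=rewrite | github.com/ViktorW03/Git-Verkefni | T-111-PROG----/Projects/Data-projects/project-9.py | open_doc
-- ===== SOURCE A (Python) =====
-- def open_doc(content):
--     doc_dict = {}
--     doc = []
--     doc_num = 1
--     for line in content:
--         if line.strip() == "<END OF DOCUMENT>":
--             doc_key = f"Document_{doc_num}"
--             doc_dict[doc_key] = "\n".join(doc)
--             doc = []
--             doc_num += 1
--         else:
--             doc.append(line.strip())
--     return doc_dict
-- ===== SOURCE B (Python) =====
-- def open_doc(content):
--     lines = [l.strip() for l in content]
--     result = {}
--     num = 1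
--     start = 0
--     for i, l in enumerate(lines):
--         if l == "<END OF DOCUMENT>":
--             result[f"Document_{num}"] = "\n".join(lines[start:i])
--             num += 1
--             start = i + 1
--     return result
-- ===== Notes on version B (the rewrite author's own statement) =====
-- stated objective: alternative
-- what changed: B first materializes the stripped lines as a list, then partitions that list at each marker occurrence by index/slice ('\n'.join(lines[start:i])), instead of A's incremental append-buffer that is flushed and reset at each marker.
import Mathlib
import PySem

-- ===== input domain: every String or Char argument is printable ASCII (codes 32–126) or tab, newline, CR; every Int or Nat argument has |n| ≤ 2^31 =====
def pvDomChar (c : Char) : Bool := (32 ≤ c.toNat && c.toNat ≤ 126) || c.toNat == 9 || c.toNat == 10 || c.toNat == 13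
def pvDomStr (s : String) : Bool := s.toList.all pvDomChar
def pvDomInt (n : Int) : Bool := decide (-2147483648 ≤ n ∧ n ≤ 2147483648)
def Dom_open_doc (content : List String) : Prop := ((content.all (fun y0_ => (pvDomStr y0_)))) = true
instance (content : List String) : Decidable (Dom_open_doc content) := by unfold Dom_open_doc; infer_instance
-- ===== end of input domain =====

-- B replaces A's incremental flush-and-reset append buffer with materialize-then-partition:
-- strip all lines first, then cut the list at each marker with index slices. Alternative
-- decomposition, same cost; return value only (A mutates nothing observable).

-- ===== PORT A =====
-- A's loop body, on the (dict, buffer, counter) state; the line is stripped inside, as in A.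
def aStep (st : PySem.Dict String String × List String × Int) (line : String) :
    PySem.Dict String String × List String × Int :=
  if PySem.Str.strip line = "<END OF DOCUMENT>" then
    ((st.1).insert ("Document_" ++ PySem.Int.toStr st.2.2) (PySem.Str.join "\n" st.2.1),
     [], st.2.2 + 1)
  else
    (st.1, st.2.1 ++ [PySem.Str.strip line], st.2.2)

def open_doc (content : List String) : List (String × String) :=
  (content.foldl aStep (PySem.Dict.empty, [], 1)).1.items

-- ===== PORT B =====
-- B's loop body, on the (dict, num, start) state; slices the pre-stripped `lines` list.
def bStep (lines : List String) (st : PySem.Dict String String × Int × Int)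
    (p : Int × String) : PySem.Dict String String × Int × Int :=
  if p.2 = "<END OF DOCUMENT>" then
    ((st.1).insert ("Document_" ++ PySem.Int.toStr st.2.1)
       (PySem.Str.join "\n" (PySem.List.slice lines (some st.2.2) (some p.1))),
     st.2.1 + 1, p.1 + 1)
  else st

def open_doc_alt (content : List String) : List (String × String) :=
  let lines := content.map PySem.Str.strip
  ((PySem.List.enumerate lines).foldl (bStep lines) (PySem.Dict.empty, 1, 0)).1.items

-- ===== PRECONDITION & SPEC =====
def Spec_open_doc (content : List String) (out : List (String × String)) : Prop := out = open_doc_alt content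
instance (content : List String) (out : List (String × String)) : Decidable (Spec_open_doc content out) := by unfold Spec_open_doc; infer_instance

-- ===== CLAIM (what is proved, stated in full; the proofs are below) =====
def Claim_equal_open_doc : Prop := ∀ (content : List String), Dom_open_doc content → Spec_open_doc content (open_doc content)

-- ===== LEMMAS AND PROOFS =====

-- A's step with the strip already performed (aStep st line = aStep' st (strip line)).
def aStep' (st : PySem.Dict String String × List String × Int) (line : String) :
    PySem.Dict String String × List String × Int :=
  if line = "<END OF DOCUMENT>" then
    ((st.1).insert ("Document_" ++ PySem.Int.toStr st.2.2) (PySem.Str.join "\n" st.2.1),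
     [], st.2.2 + 1)
  else
    (st.1, st.2.1 ++ [line], st.2.2)

-- Core invariant: with the stripped lines split as pre ++ rest and s ≤ pre.length,
-- A's buffer equals pre.drop s and the two folds build the same dictionary.
theorem step_eq (rest : List String) : ∀ (pre : List String) (s : Nat)
    (d : PySem.Dict String String) (n : Int), s ≤ pre.length →
    (rest.foldl aStep' (d, pre.drop s, n)).1
      = ((PySem.List.enumerate rest (pre.length : Int)).foldl (bStep (pre ++ rest)) (d, n, (s : Int))).1 := by
  induction rest with
  | nil => intro pre s d n hs; simp [PySem.List.enumerate_nil]
  | cons x rest ih =>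
    intro pre s d n hs
    rw [PySem.List.enumerate_cons]
    simp only [List.foldl_cons]
    by_cases hx : x = "<END OF DOCUMENT>"
    · subst hx
      have hslice : PySem.List.slice (pre ++ "<END OF DOCUMENT>" :: rest) (some (s : Int)) (some (pre.length : Int))
          = pre.drop s := by
        rw [PySem.List.slice_natCast]
        rw [List.drop_append_of_le_length hs]
        rw [List.take_append_of_le_length (by simp)]
        exact List.take_of_length_le (by simp)
      simp only [aStep', bStep, hslice]
      have := ih (pre ++ ["<END OF DOCUMENT>"]) (pre.length + 1)
        (d.insert ("Document_" ++ PySem.Int.toStr n) (PySem.Str.join "\n" (pre.drop s))) (n + 1)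
        (by simp)
      simp only [List.length_append, List.length_singleton] at this
      have hd : (pre ++ ["<END OF DOCUMENT>"]).drop (pre.length + 1) = ([] : List String) := by simp
      rw [hd, List.append_assoc] at this
      push_cast at this ⊢
      simpa using this
    · have hdrop : (pre ++ [x]).drop s = pre.drop s ++ [x] :=
        List.drop_append_of_le_length hs
      simp only [aStep', bStep, hx]
      have := ih (pre ++ [x]) s d n (by simp; omega)
      simp only [List.length_append, List.length_singleton] at this
      rw [hdrop, List.append_assoc] at this
      push_cast at this ⊢
      simpa using this

theorem open_doc_eq_alt (content : List String) :
    open_doc content = open_doc_alt content := by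
  unfold open_doc open_doc_alt
  have h1 : content.foldl aStep (PySem.Dict.empty, [], 1)
      = (content.map PySem.Str.strip).foldl aStep' (PySem.Dict.empty, [], 1) := by
    rw [List.foldl_map]
    rfl
  rw [h1]
  have := step_eq (content.map PySem.Str.strip) [] 0 PySem.Dict.empty 1 (by simp)
  simpa using congrArg PySem.Dict.items this

-- ===== VERDICT (by name: the statement is the Claim_ definition above) =====
theorem open_doc_spec : Claim_equal_open_doc := by
  intro content _
  exact open_doc_eq_alt content
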